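-- pv_equiv track=rewrite | github.com/augustin64/advent-of-code | 2022/day18.py | part2_old
-- ===== SOURCE A (Python) =====
-- def nb_voisins(cube, sample):
--     vois = 0
--     if (cube[0]-1, cube[1], cube[2]) in sample:
--         vois += 1
--     if (cube[0]+1, cube[1], cube[2]) in sample:
--         vois += 1
--     if (cube[0], cube[1]-1, cube[2]) in sample:
--         vois += 1
--     if (cube[0], cube[1]+1, cube[2]) in sample:
--         vois += 1
--     if (cube[0], cube[1], cube[2]-1) in sample:
--         vois += 1
--     if (cube[0], cube[1], cube[2]+1) in sample:
--         vois += 1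
--
--     return vois
--
-- def is_exterior(cube, sample):
--     if nb_voisins(cube, sample) == 6:
--         return False
--     if cube[0] == min([i[0] for i in sample if (i[1], i[2])==(cube[1], cube[2])]):
--         return True
--     if cube[0] == max([i[0] for i in sample if (i[1], i[2])==(cube[1], cube[2])]):
--         return True
--     if cube[1] == min([i[1] for i in sample if (i[0], i[2])==(cube[0], cube[2])]):
--         return True
--     if cube[1] == max([i[1] for i in sample if (i[0], i[2])==(cube[0], cube[2])]):
--         return True
--     if cube[2] == min([i[2] for i in sample if (i[0], i[1])==(cube[0], cube[1])]):
--         return True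
--     if cube[2] == max([i[2] for i in sample if (i[0], i[1])==(cube[0], cube[1])]):
--         return True
--
--     return False
--
-- def part2_old(sample):
--     """Partie 2 du défi"""
--     """Ne regarde que les extrema, omet des résultats"""
--     sides = 6*len(sample)
--     for cube in sample:
--         if not is_exterior(cube, sample):
--             sides -= 6
--         else:
--             sides -= nb_voisins(cube, sample)
--     return sides
-- ===== SOURCE B (Python) =====
-- def part2_old(sample):
--     """Partie 2 du défi"""
--     """Ne regarde que les extrema, omet des résultats"""
--     cubes = set(sample)
--     xr, yr, zr = {}, {}, {}
--     for x, y, z in sample: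
--         if (y, z) in xr:
--             lo, hi = xr[(y, z)]
--             xr[(y, z)] = (min(lo, x), max(hi, x))
--         else:
--             xr[(y, z)] = (x, x)
--         if (x, z) in yr:
--             lo, hi = yr[(x, z)]
--             yr[(x, z)] = (min(lo, y), max(hi, y))
--         else:
--             yr[(x, z)] = (y, y)
--         if (x, y) in zr:
--             lo, hi = zr[(x, y)]
--             zr[(x, y)] = (min(lo, z), max(hi, z))
--         else:
--             zr[(x, y)] = (z, z)
--     sides = 0
--     for x, y, z in sample:
--         vois = (
--             ((x - 1, y, z) in cubes) + ((x + 1, y, z) in cubes)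
--             + ((x, y - 1, z) in cubes) + ((x, y + 1, z) in cubes)
--             + ((x, y, z - 1) in cubes) + ((x, y, z + 1) in cubes)
--         )
--         if vois == 6:
--             continue
--         xlo, xhi = xr[(y, z)]
--         ylo, yhi = yr[(x, z)]
--         zlo, zhi = zr[(x, y)]
--         if x == xlo or x == xhi or y == ylo or y == yhi or z == zlo or z == zhi:
--             sides += 6 - vois
--     return sides
-- ===== Notes on version B (the rewrite author's own statement) =====
-- stated objective: faster
-- what changed: B precomputes, in one pass, a set of the cubes and three dicts mapping each axis-aligned line to its (min,max) coordinate, so each cube's neighbour count and extremum test become O(1) lookups instead of A's six list scans and six min/max comprehensions over the whole sample per cube.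
import Mathlib
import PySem

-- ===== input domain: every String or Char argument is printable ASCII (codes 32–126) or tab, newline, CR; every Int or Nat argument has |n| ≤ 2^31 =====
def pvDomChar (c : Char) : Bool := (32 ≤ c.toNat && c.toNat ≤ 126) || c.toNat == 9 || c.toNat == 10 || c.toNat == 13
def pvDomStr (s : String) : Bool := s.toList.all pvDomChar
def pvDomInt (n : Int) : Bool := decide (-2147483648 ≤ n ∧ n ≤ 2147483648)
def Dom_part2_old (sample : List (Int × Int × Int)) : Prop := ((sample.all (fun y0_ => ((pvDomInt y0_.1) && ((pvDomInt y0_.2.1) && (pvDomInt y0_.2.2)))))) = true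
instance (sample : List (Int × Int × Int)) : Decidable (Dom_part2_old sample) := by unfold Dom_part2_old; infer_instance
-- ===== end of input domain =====

-- B precomputes a cube set and three per-line (min,max) dicts in one pass, replacing A's per-cube
-- list scans and min/max comprehensions by O(1) lookups; objective: faster.

-- ===== PORT A =====
def nbVoisins (cube : Int × Int × Int) (sample : List (Int × Int × Int)) : Int :=
  let vois : Int := 0
  let vois := if (cube.1 - 1, cube.2.1, cube.2.2) ∈ sample then vois + 1 else vois
  let vois := if (cube.1 + 1, cube.2.1, cube.2.2) ∈ sample then vois + 1 else vois
  let vois := if (cube.1, cube.2.1 - 1, cube.2.2) ∈ sample then vois + 1 else vois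
  let vois := if (cube.1, cube.2.1 + 1, cube.2.2) ∈ sample then vois + 1 else vois
  let vois := if (cube.1, cube.2.1, cube.2.2 - 1) ∈ sample then vois + 1 else vois
  let vois := if (cube.1, cube.2.1, cube.2.2 + 1) ∈ sample then vois + 1 else vois
  vois

-- 'cube[a] == min(comprehension)': the comprehension is nonempty for every cube of sample (the cube
-- itself qualifies), so Python's min/max never raises inside part2_old; the none branch is unreachable.
def chkA (v : Int) (o : Option Int) : Bool :=
  match o with
  | some m => v == m
  | none => false

def isExterior (cube : Int × Int × Int) (sample : List (Int × Int × Int)) : Bool :=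
  if nbVoisins cube sample == 6 then false
  else
    let xsX := (sample.filter (fun i => (i.2.1, i.2.2) == (cube.2.1, cube.2.2))).map (fun i => i.1)
    let xsY := (sample.filter (fun i => (i.1, i.2.2) == (cube.1, cube.2.2))).map (fun i => i.2.1)
    let xsZ := (sample.filter (fun i => (i.1, i.2.1) == (cube.1, cube.2.1))).map (fun i => i.2.2)
    if chkA cube.1 (PySem.List.min? xsX (fun a => a)) then true
    else if chkA cube.1 (PySem.List.max? xsX (fun a => a)) then true
    else if chkA cube.2.1 (PySem.List.min? xsY (fun a => a)) then true
    else if chkA cube.2.1 (PySem.List.max? xsY (fun a => a)) then true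
    else if chkA cube.2.2 (PySem.List.min? xsZ (fun a => a)) then true
    else if chkA cube.2.2 (PySem.List.max? xsZ (fun a => a)) then true
    else false

def part2_old (sample : List (Int × Int × Int)) : Int :=
  sample.foldl
    (fun sides cube =>
      if !(isExterior cube sample) then sides - 6 else sides - nbVoisins cube sample)
    (6 * (sample.length : Int))

-- ===== PORT B =====
-- one dict-update step: extend the (min,max) range of the line 'key' with coordinate v
def lineUpd (d : PySem.Dict (Int × Int) (Int × Int)) (key : Int × Int) (v : Int) :
    PySem.Dict (Int × Int) (Int × Int) :=
  match d.get? key with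
  | some (lo, hi) => d.insert key (min lo v, max hi v)
  | none => d.insert key (v, v)

def buildRanges (sample : List (Int × Int × Int)) :
    PySem.Dict (Int × Int) (Int × Int) ×
      (PySem.Dict (Int × Int) (Int × Int) × PySem.Dict (Int × Int) (Int × Int)) :=
  sample.foldl
    (fun s c =>
      (lineUpd s.1 (c.2.1, c.2.2) c.1,
        (lineUpd s.2.1 (c.1, c.2.2) c.2.1,
          lineUpd s.2.2 (c.1, c.2.1) c.2.2)))
    (PySem.Dict.empty, (PySem.Dict.empty, PySem.Dict.empty))

-- 'xr[(y, z)]': the key is always present for a cube of sample, so Python's lookup never raises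
-- inside part2_old; the default (0, 0) is unreachable.
def lineGet (d : PySem.Dict (Int × Int) (Int × Int)) (key : Int × Int) : Int × Int :=
  (d.get? key).getD (0, 0)

def part2_old_alt (sample : List (Int × Int × Int)) : Int :=
  let cubes : PySem.Set (Int × Int × Int) := PySem.Set.ofList sample
  let r := buildRanges sample
  sample.foldl
    (fun sides c =>
      let vois : Int :=
        (if (c.1 - 1, c.2.1, c.2.2) ∈ cubes then 1 else 0)
          + (if (c.1 + 1, c.2.1, c.2.2) ∈ cubes then 1 else 0)
          + (if (c.1, c.2.1 - 1, c.2.2) ∈ cubes then 1 else 0)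
          + (if (c.1, c.2.1 + 1, c.2.2) ∈ cubes then 1 else 0)
          + (if (c.1, c.2.1, c.2.2 - 1) ∈ cubes then 1 else 0)
          + (if (c.1, c.2.1, c.2.2 + 1) ∈ cubes then 1 else 0)
      if vois == 6 then sides
      else
        let xb := lineGet r.1 (c.2.1, c.2.2)
        let yb := lineGet r.2.1 (c.1, c.2.2)
        let zb := lineGet r.2.2 (c.1, c.2.1)
        if c.1 == xb.1 || c.1 == xb.2 || c.2.1 == yb.1 || c.2.1 == yb.2
            || c.2.2 == zb.1 || c.2.2 == zb.2 then
          sides + (6 - vois)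
        else sides)
    0

-- ===== PRECONDITION & SPEC =====
def Spec_part2_old (sample : List (Int × Int × Int)) (out : Int) : Prop := out = part2_old_alt sample
instance (sample : List (Int × Int × Int)) (out : Int) : Decidable (Spec_part2_old sample out) := by unfold Spec_part2_old; infer_instance

-- ===== CLAIM (what is proved, stated in full; the proofs are below) =====
def Claim_equal_part2_old : Prop := ∀ (sample : List (Int × Int × Int)), Dom_part2_old sample → Spec_part2_old sample (part2_old sample)

-- ===== LEMMAS AND PROOFS =====

-- A's per-cube cost (what A subtracts from 6*len for this cube)
def aCost (sample : List (Int × Int × Int)) (cube : Int × Int × Int) : Int :=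
  if !(isExterior cube sample) then 6 else nbVoisins cube sample

-- B's per-cube gain (what B adds to 0 for this cube)
def bGain (sample : List (Int × Int × Int)) (c : Int × Int × Int) : Int :=
  let cubes : PySem.Set (Int × Int × Int) := PySem.Set.ofList sample
  let r := buildRanges sample
  let vois : Int :=
    (if (c.1 - 1, c.2.1, c.2.2) ∈ cubes then 1 else 0)
      + (if (c.1 + 1, c.2.1, c.2.2) ∈ cubes then 1 else 0)
      + (if (c.1, c.2.1 - 1, c.2.2) ∈ cubes then 1 else 0)
      + (if (c.1, c.2.1 + 1, c.2.2) ∈ cubes then 1 else 0)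
      + (if (c.1, c.2.1, c.2.2 - 1) ∈ cubes then 1 else 0)
      + (if (c.1, c.2.1, c.2.2 + 1) ∈ cubes then 1 else 0)
  if vois == 6 then 0
  else
    let xb := lineGet r.1 (c.2.1, c.2.2)
    let yb := lineGet r.2.1 (c.1, c.2.2)
    let zb := lineGet r.2.2 (c.1, c.2.1)
    if c.1 == xb.1 || c.1 == xb.2 || c.2.1 == yb.1 || c.2.1 == yb.2
        || c.2.2 == zb.1 || c.2.2 == zb.2 then 6 - vois
    else 0

theorem get?_lineUpd_self (d : PySem.Dict (Int × Int) (Int × Int)) (key : Int × Int) (v : Int) :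
    (lineUpd d key v).get? key
      = some (match d.get? key with
              | some (lo, hi) => (min lo v, max hi v)
              | none => (v, v)) := by
  unfold lineUpd
  cases hd : d.get? key with
  | none => rw [PySem.Dict.get?_insert_self]
  | some p => obtain ⟨lo, hi⟩ := p; rw [PySem.Dict.get?_insert_self]

theorem get?_lineUpd_of_ne (d : PySem.Dict (Int × Int) (Int × Int)) (key key' : Int × Int)
    (v : Int) (h : key' ≠ key) : (lineUpd d key v).get? key' = d.get? key' := by
  unfold lineUpd
  cases hd : d.get? key with
  | none => rw [PySem.Dict.get?_insert_of_ne _ _ h]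
  | some p => obtain ⟨lo, hi⟩ := p; rw [PySem.Dict.get?_insert_of_ne _ _ h]

-- the dict built by folding lineUpd over sample holds, at each key, exactly the running
-- min/max of the projected coordinates of the cubes on that line
theorem get?_lineFold (sample : List (Int × Int × Int)) (kf : Int × Int × Int → Int × Int)
    (vf : Int × Int × Int → Int) (key : Int × Int) :
    (sample.foldl (fun d c => lineUpd d (kf c) (vf c)) PySem.Dict.empty).get? key
      = match (sample.filter (fun c => kf c == key)).map vf with
        | [] => none
        | v :: t => some (t.foldl min v, t.foldl max v) := by
  induction sample using List.reverseRecOn with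
  | nil => simp [PySem.Dict.get?_empty]
  | append_singleton xs c ih =>
    rw [List.foldl_append, List.filter_append, List.map_append, List.foldl_cons, List.foldl_nil]
    by_cases hk : kf c = key
    · have hf1 : List.filter (fun c' => kf c' == key) [c] = [c] := by simp [hk]
      rw [hf1, List.map_cons, List.map_nil, hk, get?_lineUpd_self, ih]
      cases hfx : (xs.filter (fun c' => kf c' == key)).map vf with
      | nil => simp
      | cons v t => simp [List.foldl_append]
    · have hf1 : List.filter (fun c' => kf c' == key) [c] = [] := by simp [hk]
      rw [hf1, List.map_nil, List.append_nil, get?_lineUpd_of_ne _ _ _ _ (fun h => hk h.symm)]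
      exact ih

-- a fold with three independent accumulators is three folds (nested-pair variant of
-- PySem.List.foldl_prod_mk, which does not apply to this nesting)
theorem foldl_triple {β σ₁ σ₂ σ₃ : Type} (f : σ₁ → β → σ₁) (g : σ₂ → β → σ₂)
    (h : σ₃ → β → σ₃) (l : List β) (a : σ₁) (b : σ₂) (c : σ₃) :
    l.foldl (fun s e => (f s.1 e, g s.2.1 e, h s.2.2 e)) (a, b, c)
      = (l.foldl f a, l.foldl g b, l.foldl h c) := by
  induction l generalizing a b c with
  | nil => rfl
  | cons x xs ih => simp only [List.foldl_cons]; exact ih (f a x) (g b x) (h c x)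

-- buildRanges splits into three independent folds
theorem buildRanges_eq (sample : List (Int × Int × Int)) :
    buildRanges sample
      = (sample.foldl (fun d c => lineUpd d (c.2.1, c.2.2) c.1) PySem.Dict.empty,
          (sample.foldl (fun d c => lineUpd d (c.1, c.2.2) c.2.1) PySem.Dict.empty,
            sample.foldl (fun d c => lineUpd d (c.1, c.2.1) c.2.2) PySem.Dict.empty)) := by
  unfold buildRanges
  exact foldl_triple (fun d c => lineUpd d (c.2.1, c.2.2) c.1)
    (fun d c => lineUpd d (c.1, c.2.2) c.2.1)
    (fun d c => lineUpd d (c.1, c.2.1) c.2.2) sample _ _ _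

-- A's neighbour count equals B's 0/1-sum over the cube set
theorem vois_eq (c : Int × Int × Int) (sample : List (Int × Int × Int)) :
    nbVoisins c sample
      = (if (c.1 - 1, c.2.1, c.2.2) ∈ PySem.Set.ofList sample then (1 : Int) else 0)
          + (if (c.1 + 1, c.2.1, c.2.2) ∈ PySem.Set.ofList sample then 1 else 0)
          + (if (c.1, c.2.1 - 1, c.2.2) ∈ PySem.Set.ofList sample then 1 else 0)
          + (if (c.1, c.2.1 + 1, c.2.2) ∈ PySem.Set.ofList sample then 1 else 0)
          + (if (c.1, c.2.1, c.2.2 - 1) ∈ PySem.Set.ofList sample then 1 else 0)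
          + (if (c.1, c.2.1, c.2.2 + 1) ∈ PySem.Set.ofList sample then 1 else 0) := by
  simp only [nbVoisins, PySem.Set.mem_ofList]
  split_ifs <;> omega

-- per-cube agreement on members of sample
theorem percube (sample : List (Int × Int × Int)) (c : Int × Int × Int) (hc : c ∈ sample) :
    6 + -(aCost sample c) = bGain sample c := by
  -- the three filtered projection lists, each nonempty because c itself qualifies
  have memX : c.1 ∈ (sample.filter (fun i => (i.2.1, i.2.2) == (c.2.1, c.2.2))).map (fun i => i.1) := by
    exact List.mem_map_of_mem (List.mem_filter.mpr ⟨hc, by simp⟩)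
  have memY : c.2.1 ∈ (sample.filter (fun i => (i.1, i.2.2) == (c.1, c.2.2))).map (fun i => i.2.1) := by
    exact List.mem_map_of_mem (List.mem_filter.mpr ⟨hc, by simp⟩)
  have memZ : c.2.2 ∈ (sample.filter (fun i => (i.1, i.2.1) == (c.1, c.2.1))).map (fun i => i.2.2) := by
    exact List.mem_map_of_mem (List.mem_filter.mpr ⟨hc, by simp⟩)
  obtain ⟨vx, tx, hx⟩ : ∃ v t, (sample.filter (fun i => (i.2.1, i.2.2) == (c.2.1, c.2.2))).map (fun i => i.1) = v :: t :=
    List.exists_cons_of_ne_nil (List.ne_nil_of_mem memX)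
  obtain ⟨vy, ty, hy⟩ : ∃ v t, (sample.filter (fun i => (i.1, i.2.2) == (c.1, c.2.2))).map (fun i => i.2.1) = v :: t :=
    List.exists_cons_of_ne_nil (List.ne_nil_of_mem memY)
  obtain ⟨vz, tz, hz⟩ : ∃ v t, (sample.filter (fun i => (i.1, i.2.1) == (c.1, c.2.1))).map (fun i => i.2.2) = v :: t :=
    List.exists_cons_of_ne_nil (List.ne_nil_of_mem memZ)
  have hgx := get?_lineFold sample (fun c' => (c'.2.1, c'.2.2)) (fun c' => c'.1) (c.2.1, c.2.2)
  have hgy := get?_lineFold sample (fun c' => (c'.1, c'.2.2)) (fun c' => c'.2.1) (c.1, c.2.2)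
  have hgz := get?_lineFold sample (fun c' => (c'.1, c'.2.1)) (fun c' => c'.2.2) (c.1, c.2.1)
  rw [hx] at hgx
  rw [hy] at hgy
  rw [hz] at hgz
  unfold bGain aCost isExterior
  rw [buildRanges_eq]
  dsimp only
  rw [hx, hy, hz, ← vois_eq]
  simp only [PySem.List.min?_id_cons, PySem.List.max?_id_cons, chkA, lineGet,
    hgx, hgy, hgz, Option.getD_some]
  split_ifs <;> simp_all <;> omega

-- a loop 'acc = step(acc, x)' whose step adds g(x) is init + sum of g
theorem foldl_eq_sum_gain {β : Type} (l : List β) (f : Int → β → Int) (g : β → Int)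
    (init : Int) (h : ∀ acc x, f acc x = acc + g x) :
    l.foldl f init = init + (l.map g).sum := by
  have hf : f = fun acc x => acc + g x := funext fun acc => funext fun x => h acc x
  rw [hf]
  exact PySem.List.foldl_add l g init

-- ===== VERDICT (by name: the statement is the Claim_ definition above) =====
theorem part2_old_spec : Claim_equal_part2_old := by
  intro sample _
  unfold Spec_part2_old part2_old part2_old_alt
  dsimp only
  rw [foldl_eq_sum_gain (g := fun cube => -(aCost sample cube))
      (h := fun acc x => by unfold aCost; dsimp only; split_ifs <;> omega)]
  rw [foldl_eq_sum_gain (g := bGain sample)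
      (h := fun acc x => by unfold bGain; dsimp only; split_ifs <;> omega)]
  have h1 : (sample.map (bGain sample)).sum
      = (sample.map (fun c => 6 + -(aCost sample c))).sum :=
    congrArg List.sum (List.map_congr_left (fun c hc => (percube sample c hc).symm))
  rw [h1, PySem.List.sum_map_add_int, PySem.List.sum_map_const_int]
  ring
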